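-- pv_equiv track=rewrite | github.com/retkowsky/azure_visual_search_toolkit | vec2Text.py | convert_field_num_to_string
-- ===== SOURCE A (Python) =====
-- def convert_field_num_to_string(dim):
--     """
--     Generate fake terms from
--     """
--     dimStr = str(dim)
--     curStr = ''
--
--     for i in range(len(dimStr)):
--         curChar = dimStr[i]
--         if curChar == '0':
--             curStr += 'A'
--         elif curChar == '1':
--             curStr += 'B'
--         elif curChar == '2':
--             curStr += 'C'
--         elif curChar == '3':
--             curStr += 'D'
--         elif curChar == '4':
--             curStr += 'E'
--         elif curChar == '5':
--             curStr += 'F'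
--         elif curChar == '6':
--             curStr += 'G'
--         elif curChar == '7':
--             curStr += 'H'
--         elif curChar == '8':
--             curStr += 'I'
--         elif curChar == '9':
--             curStr += 'J'
--
--     return curStr
-- ===== SOURCE B (Python) =====
-- def convert_field_num_to_string(dim):
--     """Generate fake terms from"""
--     n = abs(dim)  # the '-' sign maps to no letter, just like in the original
--     letters = []
--     while True:
--         n, d = divmod(n, 10)
--         letters.append("ABCDEFGHIJ"[d])
--         if n == 0:
--             break
--     return ''.join(reversed(letters))
-- ===== Notes on version B (the rewrite author's own statement) =====
-- stated objective: alternative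
-- what changed: B never converts the number to a string: it extracts the digits of |dim| arithmetically with repeated divmod, collects the letters least-significant-first and reverses at the end, replacing A's str(dim) loop with its ten-way if/elif dispatch per character.
import Mathlib
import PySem

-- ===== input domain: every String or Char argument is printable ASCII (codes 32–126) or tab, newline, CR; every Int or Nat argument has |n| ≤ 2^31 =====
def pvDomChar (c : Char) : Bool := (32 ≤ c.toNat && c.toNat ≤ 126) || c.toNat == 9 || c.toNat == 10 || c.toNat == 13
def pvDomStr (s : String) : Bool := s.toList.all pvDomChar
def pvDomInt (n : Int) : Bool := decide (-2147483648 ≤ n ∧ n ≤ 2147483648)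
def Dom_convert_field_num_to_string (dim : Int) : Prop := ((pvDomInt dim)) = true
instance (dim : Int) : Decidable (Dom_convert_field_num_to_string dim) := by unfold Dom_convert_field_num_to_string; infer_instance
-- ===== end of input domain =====

-- B extracts the digits of |dim| arithmetically by repeated divmod (least-significant first,
-- reversed at the end) instead of A's loop over str(dim) with a ten-way if/elif dispatch
-- (objective: alternative). Return-value equivalence; neither mutates anything.

-- ===== PORT A =====
-- A's loop body: the ten-branch elif chain, appending one letter per digit (non-digits fall through).
def pvStepA (acc : List Char) (curChar : Char) : List Char :=
  if curChar = '0' then acc ++ ['A']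
  else if curChar = '1' then acc ++ ['B']
  else if curChar = '2' then acc ++ ['C']
  else if curChar = '3' then acc ++ ['D']
  else if curChar = '4' then acc ++ ['E']
  else if curChar = '5' then acc ++ ['F']
  else if curChar = '6' then acc ++ ['G']
  else if curChar = '7' then acc ++ ['H']
  else if curChar = '8' then acc ++ ['I']
  else if curChar = '9' then acc ++ ['J']
  else acc

def convert_field_num_to_string (dim : Int) : String :=
  let dimStr := PySem.Int.toChars dim
  String.ofList (dimStr.foldl pvStepA [])

-- ===== PORT B =====
-- "ABCDEFGHIJ"
def pvLetters : List Char := ['A','B','C','D','E','F','G','H','I','J']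

-- Source B's do-while loop: n, d = divmod(n, 10); letters.append("ABCDEFGHIJ"[d]); stop when n == 0
def pvLoopB (n : Nat) (letters : List Char) : List Char :=
  let d := n % 10
  let n' := n / 10
  let letters' := letters ++ [pvLetters.getD d ' ']
  if n' = 0 then letters' else pvLoopB n' letters'
termination_by n
decreasing_by omega

def convert_field_num_to_string_alt (dim : Int) : String :=
  String.ofList (pvLoopB dim.natAbs []).reverse

-- ===== PRECONDITION & SPEC =====
def Spec_convert_field_num_to_string (dim : Int) (out : String) : Prop := out = convert_field_num_to_string_alt dim
instance (dim : Int) (out : String) : Decidable (Spec_convert_field_num_to_string dim out) := by unfold Spec_convert_field_num_to_string; infer_instance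

-- ===== CLAIM (what is proved, stated in full; the proofs are below) =====
def Claim_equal_convert_field_num_to_string : Prop := ∀ (dim : Int), Dom_convert_field_num_to_string dim → Spec_convert_field_num_to_string dim (convert_field_num_to_string dim)

-- ===== LEMMAS AND PROOFS =====

-- the closed-form digit→letter shift both sides realise
def pvShift (c : Char) : Char := Char.ofNat (c.toNat - '0'.toNat + 'A'.toNat)

-- specification of Nat.toDigits 10: most-significant-first decimal digit characters
def pvRep (n : Nat) : List Char :=
  if n < 10 then [Nat.digitChar n]
  else pvRep (n / 10) ++ [Nat.digitChar (n % 10)]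
termination_by n
decreasing_by omega

lemma digitChar_is_digit {d : Nat} (h : d < 10) :
    '0' ≤ Nat.digitChar d ∧ Nat.digitChar d ≤ '9' := by
  interval_cases d <;> decide

lemma shift_digitChar {d : Nat} (h : d < 10) :
    pvShift (Nat.digitChar d) = pvLetters.getD d ' ' := by
  interval_cases d <;> decide

-- A's elif chain on one character = filter-and-shift on that character
lemma pvStepA_eq (acc : List Char) (c : Char) :
    pvStepA acc c =
      acc ++ (if '0' ≤ c ∧ c ≤ '9' then [pvShift c] else []) := by
  unfold pvStepA pvShift
  by_cases h0 : c = '0'; · subst h0; simp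
  by_cases h1 : c = '1'; · subst h1; simp [h0]
  by_cases h2 : c = '2'; · subst h2; simp [h0, h1]
  by_cases h3 : c = '3'; · subst h3; simp [h0, h1, h2]
  by_cases h4 : c = '4'; · subst h4; simp [h0, h1, h2, h3]
  by_cases h5 : c = '5'; · subst h5; simp [h0, h1, h2, h3, h4]
  by_cases h6 : c = '6'; · subst h6; simp [h0, h1, h2, h3, h4, h5]
  by_cases h7 : c = '7'; · subst h7; simp [h0, h1, h2, h3, h4, h5, h6]
  by_cases h8 : c = '8'; · subst h8; simp [h0, h1, h2, h3, h4, h5, h6, h7]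
  by_cases h9 : c = '9'; · subst h9; simp [h0, h1, h2, h3, h4, h5, h6, h7, h8]
  have hnd : ¬ ('0' ≤ c ∧ c ≤ '9') := by
    rintro ⟨hl, hr⟩
    have hl' : 48 ≤ c.toNat := hl
    have hr' : c.toNat ≤ 57 := hr
    have : c = Char.ofNat c.toNat := (Char.ofNat_toNat c).symm
    interval_cases h : c.toNat <;> simp_all
  simp [h0, h1, h2, h3, h4, h5, h6, h7, h8, h9, hnd]

lemma pvFoldA_eq (cs : List Char) (acc : List Char) :
    cs.foldl pvStepA acc =
      acc ++ (cs.filter (fun c => decide ('0' ≤ c ∧ c ≤ '9'))).map pvShift := by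
  induction cs generalizing acc with
  | nil => simp
  | cons c cs ih =>
    rw [List.foldl_cons, ih, pvStepA_eq]
    by_cases h : '0' ≤ c ∧ c ≤ '9' <;> simp [h]

lemma toDigitsCore_eq (f : Nat) :
    ∀ (n : Nat) (ds : List Char), n < f →
      Nat.toDigitsCore 10 f n ds = pvRep n ++ ds := by
  induction f with
  | zero => intro n ds h; omega
  | succ f ih =>
    intro n ds h
    rw [Nat.toDigitsCore]
    by_cases h0 : n / 10 = 0
    · have hn : n < 10 := by omega
      rw [pvRep]
      simp [h0, hn, Nat.mod_eq_of_lt hn]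
    · have hn : ¬ n < 10 := by omega
      rw [if_neg h0, ih (n / 10) _ (by omega)]
      conv_rhs => rw [pvRep, if_neg hn]
      simp

lemma toDigits_eq (n : Nat) : Nat.toDigits 10 n = pvRep n := by
  have := toDigitsCore_eq (n + 1) n [] (by omega)
  simpa [Nat.toDigits] using this

lemma pvRep_digits (n : Nat) : ∀ c ∈ pvRep n, '0' ≤ c ∧ c ≤ '9' := by
  induction n using Nat.strong_induction_on with
  | _ n ih =>
    intro c hc
    rw [pvRep] at hc
    by_cases h : n < 10
    · rw [if_pos h] at hc
      simp at hc
      subst hc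
      exact digitChar_is_digit h
    · rw [if_neg h] at hc
      rcases List.mem_append.mp hc with h1 | h1
      · exact ih (n / 10) (by omega) c h1
      · simp at h1
        subst h1
        exact digitChar_is_digit (Nat.mod_lt _ (by omega))

lemma pvLoopB_eq (n : Nat) : ∀ acc : List Char,
    pvLoopB n acc = acc ++ ((pvRep n).map pvShift).reverse := by
  induction n using Nat.strong_induction_on with
  | _ n ih =>
    intro acc
    rw [pvLoopB]
    by_cases h0 : n / 10 = 0
    · have hn : n < 10 := by omega
      rw [pvRep]
      simp [h0, hn, Nat.mod_eq_of_lt hn, shift_digitChar hn]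
    · have hn : ¬ n < 10 := by omega
      rw [if_neg h0, ih (n / 10) (by omega)]
      conv_rhs => rw [pvRep, if_neg hn]
      have := shift_digitChar (d := n % 10) (Nat.mod_lt n (by omega))
      simp [this]

lemma filter_digits_rep (n : Nat) :
    (pvRep n).filter (fun c => decide ('0' ≤ c ∧ c ≤ '9')) = pvRep n :=
  List.filter_eq_self.mpr (fun c hc => by simpa using pvRep_digits n c hc)

-- ===== VERDICT (by name: the statement is the Claim_ definition above) =====
theorem convert_field_num_to_string_spec : Claim_equal_convert_field_num_to_string := by
  intro dim _
  show _ = _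
  unfold convert_field_num_to_string convert_field_num_to_string_alt
  rw [pvLoopB_eq]
  simp only [List.nil_append, List.reverse_reverse]
  by_cases hd : dim < 0
  · have h1 : PySem.Int.toChars dim = '-' :: Nat.toDigits 10 dim.natAbs := by
      simp [PySem.Int.toChars, hd]
    rw [h1, toDigits_eq, pvFoldA_eq, List.filter_cons_of_neg (by decide),
      filter_digits_rep]
    simp
  · have h1 : PySem.Int.toChars dim = Nat.toDigits 10 dim.toNat := by
      simp [PySem.Int.toChars, hd]
    have h2 : dim.natAbs = dim.toNat := by omega
    rw [h1, h2, toDigits_eq, pvFoldA_eq, filter_digits_rep]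
    simp
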